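-- pv_equiv track=rewrite | github.com/AlokDutta/Assinment_2 | M24CSE032_PA2 (1)/PA2_submission/src/part2_translation/translator.py | _latin_to_devanagari
-- ===== SOURCE A (Python) =====
-- LATIN_TO_DEVANAGARI = {
--     "a": "अ", "aa": "आ", "i": "इ", "ee": "ई", "u": "उ", "oo": "ऊ",
--     "e": "ए", "ai": "ऐ", "o": "ओ", "au": "औ",
--     "ka": "क", "kha": "ख", "ga": "ग", "gha": "घ",
--     "cha": "च", "chha": "छ", "ja": "ज", "jha": "झ",
--     "ta": "ट", "tha": "ठ", "da": "ड", "dha": "ढ", "na": "ण",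
--     "pa": "प", "pha": "फ", "ba": "ब", "bha": "भ", "ma": "म",
--     "ya": "य", "ra": "र", "la": "ल", "va": "व", "wa": "व",
--     "sha": "श", "sa": "स", "ha": "ह",
--     "k": "क्", "g": "ग्", "t": "त्", "d": "द्", "n": "न",
--     "p": "प्", "b": "ब्", "m": "म", "r": "र", "l": "ल",
--     "s": "स", "h": "ह",
-- }
--
-- def _latin_to_devanagari(word: str) -> str:
--     """Convert Latin transliteration to Devanagari script for TTS input."""
--     result = []
--     i = 0
--     word = word.lower()
--     while i < len(word):
--         matched = False
--         for length in [3, 2, 1]: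
--             if i + length <= len(word):
--                 chunk = word[i:i + length]
--                 if chunk in LATIN_TO_DEVANAGARI:
--                     result.append(LATIN_TO_DEVANAGARI[chunk])
--                     i += length
--                     matched = True
--                     break
--         if not matched:
--             result.append(word[i])
--             i += 1
--     return "".join(result)
-- ===== SOURCE B (Python) =====
-- LATIN_TO_DEVANAGARI = {
--     "a": "अ", "aa": "आ", "i": "इ", "ee": "ई", "u": "उ", "oo": "ऊ",
--     "e": "ए", "ai": "ऐ", "o": "ओ", "au": "औ",
--     "ka": "क", "kha": "ख", "ga": "ग", "gha": "घ",
--     "cha": "च", "chha": "छ", "ja": "ज", "jha": "झ",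
--     "ta": "ट", "tha": "ठ", "da": "ड", "dha": "ढ", "na": "ण",
--     "pa": "प", "pha": "फ", "ba": "ब", "bha": "भ", "ma": "म",
--     "ya": "य", "ra": "र", "la": "ल", "va": "व", "wa": "व",
--     "sha": "श", "sa": "स", "ha": "ह",
--     "k": "क्", "g": "ग्", "t": "त्", "d": "द्", "n": "न",
--     "p": "प्", "b": "ब्", "m": "म", "r": "र", "l": "ल",
--     "s": "स", "h": "ह",
-- }
--
-- # All (key, value) pairs sorted longest key first (stable), like a regex
-- # alternation "chha|kha|...|a|..." tried left to right at each position.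
-- _ITEMS = sorted(LATIN_TO_DEVANAGARI.items(), key=lambda kv: -len(kv[0]))
--
--
-- def _latin_to_devanagari(word: str) -> str:
--     """Convert Latin transliteration to Devanagari script for TTS input."""
--     w = word.lower()
--     out = []
--     i = 0
--     n = len(w)
--     while i < n:
--         for k, v in _ITEMS:
--             if w.startswith(k, i):
--                 out.append(v)
--                 i += len(k)
--                 break
--         else:
--             out.append(w[i])
--             i += 1
--     return "".join(out)
-- ===== Notes on version B (the rewrite author's own statement) =====
-- stated objective: alternative
-- what changed: Replaces the index-based while-loop with its per-position length-3/2/1 slice-and-dict-lookup cascade by a single scan of the dict's items pre-sorted longest-key-first (a regex-style alternation tried with startswith, consuming the string), which also lets the 4-letter key 'chha' match as the dict intends.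
-- intended difference: On words whose lowercase form contains the substring chha, A translates that stretch letter by letter (its cascade only tries chunk lengths 3, 2 and 1, so the four-letter dict key chha can never match and its first letter falls through untranslated), while B applies the dict's own entry for chha; B's output is the mapping the dict itself declares, so it is the intended value. — e.g. on _latin_to_devanagari("chha"): A returns "cहह", B returns "छ"
import Mathlib
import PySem

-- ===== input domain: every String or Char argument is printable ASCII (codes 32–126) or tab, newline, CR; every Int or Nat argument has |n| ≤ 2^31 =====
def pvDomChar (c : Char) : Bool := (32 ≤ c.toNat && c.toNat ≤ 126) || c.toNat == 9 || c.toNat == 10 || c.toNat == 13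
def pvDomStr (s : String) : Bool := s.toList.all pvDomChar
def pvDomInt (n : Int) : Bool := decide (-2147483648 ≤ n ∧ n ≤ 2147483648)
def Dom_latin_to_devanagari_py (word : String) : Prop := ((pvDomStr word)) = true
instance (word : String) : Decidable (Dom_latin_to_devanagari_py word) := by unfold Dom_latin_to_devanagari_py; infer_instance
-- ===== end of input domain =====

-- ===== PORT A =====
-- B replaces A's per-position length-3/2/1 slice-and-lookup cascade by one scan of the
-- items pre-sorted longest-key-first; it thereby also lets the 4-letter key "chha" match
-- as the dict intends, while A translates that stretch letter by letter (see D_ below).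

-- the module constant LATIN_TO_DEVANAGARI, in dict insertion order (keys/values as char lists)
def pvDict : List (List Char × List Char) := [
  (['a'], ['अ']),
  (['a', 'a'], ['आ']),
  (['i'], ['इ']),
  (['e', 'e'], ['ई']),
  (['u'], ['उ']),
  (['o', 'o'], ['ऊ']),
  (['e'], ['ए']),
  (['a', 'i'], ['ऐ']),
  (['o'], ['ओ']),
  (['a', 'u'], ['औ']),
  (['k', 'a'], ['क']),
  (['k', 'h', 'a'], ['ख']),
  (['g', 'a'], ['ग']),
  (['g', 'h', 'a'], ['घ']),
  (['c', 'h', 'a'], ['च']),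
  (['c', 'h', 'h', 'a'], ['छ']),
  (['j', 'a'], ['ज']),
  (['j', 'h', 'a'], ['झ']),
  (['t', 'a'], ['ट']),
  (['t', 'h', 'a'], ['ठ']),
  (['d', 'a'], ['ड']),
  (['d', 'h', 'a'], ['ढ']),
  (['n', 'a'], ['ण']),
  (['p', 'a'], ['प']),
  (['p', 'h', 'a'], ['फ']),
  (['b', 'a'], ['ब']),
  (['b', 'h', 'a'], ['भ']),
  (['m', 'a'], ['म']),
  (['y', 'a'], ['य']),
  (['r', 'a'], ['र']),
  (['l', 'a'], ['ल']),
  (['v', 'a'], ['व']),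
  (['w', 'a'], ['व']),
  (['s', 'h', 'a'], ['श']),
  (['s', 'a'], ['स']),
  (['h', 'a'], ['ह']),
  (['k'], ['क', '्']),
  (['g'], ['ग', '्']),
  (['t'], ['त', '्']),
  (['d'], ['द', '्']),
  (['n'], ['न']),
  (['p'], ['प', '्']),
  (['b'], ['ब', '्']),
  (['m'], ['म']),
  (['r'], ['र']),
  (['l'], ['ल']),
  (['s'], ['स']),
  (['h'], ['ह'])]

-- chunk in LATIN_TO_DEVANAGARI / LATIN_TO_DEVANAGARI[chunk]: first match in insertion order
def dictGet (k : List Char) : Option (List Char) :=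
  (pvDict.find? (fun kv => kv.1 == k)).map (fun kv => kv.2)

-- one iteration of A's while-loop body: the emitted string and how far i advances
-- (the 'for length in [3, 2, 1]' cascade with its 'i + length <= len(word)' guards)
def stepA1 (cs : List Char) : List Char × Nat :=
  match dictGet (cs.take 1) with
  | some v => (v, 1)
  | none => (cs.take 1, 1)        -- not matched: append word[i]; i += 1

def stepA2 (cs : List Char) : List Char × Nat :=
  if 2 ≤ cs.length then
    match dictGet (cs.take 2) with
    | some v => (v, 2)
    | none => stepA1 cs
  else stepA1 cs

def stepA (cs : List Char) : List Char × Nat :=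
  if 3 ≤ cs.length then
    match dictGet (cs.take 3) with
    | some v => (v, 3)
    | none => stepA2 cs
  else stepA2 cs

-- the while-loop over the remaining suffix; fuel = its length bounds the iteration count
-- (each step advances by ≥ 1, so the fuel never runs out on the initial call)
def goA : Nat → List Char → List Char
  | _, [] => []
  | 0, _ => []
  | fuel + 1, cs => (stepA cs).1 ++ goA fuel (cs.drop (stepA cs).2)

def latin_to_devanagari_py (word : String) : String :=
  String.ofList (goA word.toList.length (PySem.Chars.lower word.toList))

-- ===== PORT B =====
-- B's module constant: LATIN_TO_DEVANAGARI.items() (insertion order, key/value strings)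
def pvItemsSrc : List (String × String) :=
  [("a", "अ"), ("aa", "आ"), ("i", "इ"), ("ee", "ई"), ("u", "उ"), ("oo", "ऊ"),
   ("e", "ए"), ("ai", "ऐ"), ("o", "ओ"), ("au", "औ"),
   ("ka", "क"), ("kha", "ख"), ("ga", "ग"), ("gha", "घ"),
   ("cha", "च"), ("chha", "छ"), ("ja", "ज"), ("jha", "झ"),
   ("ta", "ट"), ("tha", "ठ"), ("da", "ड"), ("dha", "ढ"), ("na", "ण"),
   ("pa", "प"), ("pha", "फ"), ("ba", "ब"), ("bha", "भ"), ("ma", "म"),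
   ("ya", "य"), ("ra", "र"), ("la", "ल"), ("va", "व"), ("wa", "व"),
   ("sha", "श"), ("sa", "स"), ("ha", "ह"),
   ("k", "क्"), ("g", "ग्"), ("t", "त्"), ("d", "द्"), ("n", "न"),
   ("p", "प्"), ("b", "ब्"), ("m", "म"), ("r", "र"), ("l", "ल"),
   ("s", "स"), ("h", "ह")]

-- _ITEMS = sorted(LATIN_TO_DEVANAGARI.items(), key=lambda kv: -len(kv[0]))
def itemsB : List (List Char × List Char) :=
  PySem.List.sorted (pvItemsSrc.map (fun kv => (kv.1.toList, kv.2.toList)))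
    (fun kv => -(kv.1.length : Int)) false

-- the for/break over _ITEMS at position i: first item k with w.startswith(k, i)
-- (a prefix test on the suffix from i — exact), else (for-else) w[i]
def stepB (w : List Char) (i : Nat) : List Char × Nat :=
  match itemsB.find? (fun kv => kv.1.isPrefixOf (w.drop i)) with
  | some kv => (kv.2, kv.1.length)
  | none => ((w.drop i).take 1, 1)

-- the while-loop over the index i, carrying the out-list being appended to;
-- fuel = len(w) bounds the iteration count (each step advances i by ≥ 1)
def goB : Nat → List Char → Nat → List (List Char) → List (List Char)
  | 0, _, _, out => out
  | fuel + 1, w, i, out =>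
    if i < w.length then goB fuel w (i + (stepB w i).2) (out ++ [(stepB w i).1]) else out

-- "".join(out)
def latin_to_devanagari_py_alt (word : String) : String :=
  String.ofList
    ((goB (PySem.Chars.lower word.toList).length (PySem.Chars.lower word.toList) 0 []).flatten)

-- ===== PRECONDITION & SPEC =====
-- On words whose lowercase form contains the substring chha, A translates that stretch
-- letter by letter (its cascade only tries chunk lengths 3, 2 and 1, so the four-letter
-- dict key chha can never match and its first letter falls through untranslated), while
-- B applies the dict's own entry for chha, the mapping the dict itself declares.
def D_latin_to_devanagari_py (word : String) : Prop :=
  PySem.Chars.isIn "chha".toList (PySem.Chars.lower word.toList) = true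
instance (word : String) : Decidable (D_latin_to_devanagari_py word) := by
  unfold D_latin_to_devanagari_py; infer_instance

def Spec_latin_to_devanagari_py (word : String) (out : String) : Prop :=
  ¬ D_latin_to_devanagari_py word → out = latin_to_devanagari_py_alt word
instance (word : String) (out : String) : Decidable (Spec_latin_to_devanagari_py word out) := by
  unfold Spec_latin_to_devanagari_py; infer_instance

def pvDiffWitness_latin_to_devanagari_py : String := "chha"
def pvDiffWitnessOut_latin_to_devanagari_py : String × String := ("cहह", "छ")

-- ===== CLAIM (what is proved, stated in full; the proofs are below) =====
def Claim_unchanged_latin_to_devanagari_py : Prop := ∀ (word : String), Dom_latin_to_devanagari_py word → Spec_latin_to_devanagari_py word (latin_to_devanagari_py word)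
def Claim_changed_latin_to_devanagari_py : Prop := Dom_latin_to_devanagari_py (pvDiffWitness_latin_to_devanagari_py) ∧ D_latin_to_devanagari_py (pvDiffWitness_latin_to_devanagari_py) ∧ latin_to_devanagari_py (pvDiffWitness_latin_to_devanagari_py) = pvDiffWitnessOut_latin_to_devanagari_py.1 ∧ latin_to_devanagari_py_alt (pvDiffWitness_latin_to_devanagari_py) = pvDiffWitnessOut_latin_to_devanagari_py.2 ∧ pvDiffWitnessOut_latin_to_devanagari_py.1 ≠ pvDiffWitnessOut_latin_to_devanagari_py.2
def Claim_exact_latin_to_devanagari_py : Prop := ∀ (word : String), Dom_latin_to_devanagari_py word → D_latin_to_devanagari_py word → latin_to_devanagari_py word ≠ latin_to_devanagari_py_alt word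

-- ===== LEMMAS AND PROOFS =====

-- B's per-position decision, re-expressed on the remaining suffix (stepB w i reads
-- only w.drop i, definitionally)
def stepS (cs : List Char) : List Char × Nat :=
  match itemsB.find? (fun kv => kv.1.isPrefixOf cs) with
  | some kv => (kv.2, kv.1.length)
  | none => (cs.take 1, 1)

theorem stepB_eq_stepS (w : List Char) (i : Nat) : stepB w i = stepS (w.drop i) := rfl

-- B's loop, re-expressed as a chunk list over the suffix (no index, no accumulator)
def goS : Nat → List Char → List (List Char)
  | _, [] => []
  | 0, _ => []
  | fuel + 1, cs => (stepS cs).1 :: goS fuel (cs.drop (stepS cs).2)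

theorem goB_eq_goS (fuel : Nat) : ∀ (w : List Char) (i : Nat) (out : List (List Char)),
    goB fuel w i out = out ++ goS fuel (w.drop i) := by
  induction fuel with
  | zero =>
    intro w i out
    cases h : w.drop i <;> simp [goB, goS]
  | succ n ih =>
    intro w i out
    by_cases hi : i < w.length
    · have hne : w.drop i ≠ [] := by
        intro h
        have := List.drop_eq_nil_iff.mp h
        omega
      obtain ⟨c, rest, hcr⟩ := List.exists_cons_of_ne_nil hne
      show (if i < w.length then goB n w (i + (stepB w i).2) (out ++ [(stepB w i).1]) else out)
          = out ++ goS (n + 1) (w.drop i)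
      rw [if_pos hi, ih, stepB_eq_stepS, hcr]
      show out ++ [(stepS (c :: rest)).1] ++ goS n (w.drop (i + (stepS (c :: rest)).2))
          = out ++ ((stepS (c :: rest)).1 :: goS n ((c :: rest).drop (stepS (c :: rest)).2))
      rw [show w.drop (i + (stepS (c :: rest)).2) = (w.drop i).drop (stepS (c :: rest)).2 from by
            rw [List.drop_drop, Nat.add_comm], hcr, List.append_assoc]
      rfl
    · have hnil : w.drop i = [] := List.drop_eq_nil_iff.mpr (by omega)
      show (if i < w.length then goB n w (i + (stepB w i).2) (out ++ [(stepB w i).1]) else out)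
          = out ++ goS (n + 1) (w.drop i)
      rw [if_neg hi, hnil]
      simp [goS]

-- the flattened loop, with A-shaped recurrence equations
def goBf (fuel : Nat) (cs : List Char) : List Char := (goS fuel cs).flatten

theorem goBf_succ (n : Nat) (c : Char) (rest : List Char) :
    goBf (n + 1) (c :: rest) =
      (stepS (c :: rest)).1 ++ goBf n ((c :: rest).drop (stepS (c :: rest)).2) := rfl

def pvItemsL : List (List Char × List Char) :=
  pvItemsSrc.map (fun kv => (kv.1.toList, kv.2.toList))

-- the dict keys of each length, in insertion order
def pvK4 : List (List Char × List Char) := pvDict.filter (fun kv => kv.1.length == 4)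
def pvK3 : List (List Char × List Char) := pvDict.filter (fun kv => kv.1.length == 3)
def pvK2 : List (List Char × List Char) := pvDict.filter (fun kv => kv.1.length == 2)
def pvK1 : List (List Char × List Char) := pvDict.filter (fun kv => kv.1.length == 1)

-- what a step does once the winning item (or none) is known
def stepOf (r : Option (List Char × List Char)) (cs : List Char) : List Char × Nat :=
  match r with
  | some kv => (kv.2, kv.1.length)
  | none => (cs.take 1, 1)

def pfx (cs : List Char) : List Char × List Char → Bool := fun kv => kv.1.isPrefixOf cs

-- the stable sort by descending key length groups the items by length, dict order kept
theorem items_eq : itemsB = pvK4 ++ pvK3 ++ pvK2 ++ pvK1 := by decide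

theorem pvK4_eq : pvK4 = [("chha".toList, "छ".toList)] := by decide
theorem pvK3_len : ∀ kv ∈ pvK3, kv.1.length = 3 := by decide
theorem pvK2_len : ∀ kv ∈ pvK2, kv.1.length = 2 := by decide
theorem pvK1_len : ∀ kv ∈ pvK1, kv.1.length = 1 := by decide

-- generic: a first-match lookup only ever hits entries whose key has the probe's length
theorem find?_eq_find?_filter_len (l : List (List Char × List Char)) (c : List Char) (n : Nat)
    (hc : c.length = n) :
    l.find? (fun kv => kv.1 == c) = (l.filter (fun kv => kv.1.length == n)).find? (fun kv => kv.1 == c) := by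
  induction l with
  | nil => rfl
  | cons kv t ih =>
    by_cases h : kv.1.length = n
    · rw [List.filter_cons, if_pos (by simpa using h)]
      cases hbe : (kv.1 == c) <;> simp [hbe, ih]
    · have hne : (kv.1 == c) = false := by
        simp only [beq_eq_false_iff_ne, ne_eq]
        intro he; exact h (he ▸ hc)
      rw [List.filter_cons, if_neg (by simpa using h)]
      simp [hne, ih]

-- on a segment of same-length keys, "key is a prefix" and "key equals the next chunk" coincide
theorem find?_pfx_eq_find?_take (l : List (List Char × List Char)) (cs : List Char) (n : Nat)
    (hall : ∀ kv ∈ l, kv.1.length = n) (_hn : n ≤ cs.length) :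
    l.find? (pfx cs) = l.find? (fun kv => kv.1 == cs.take n) := by
  induction l with
  | nil => rfl
  | cons kv t ih =>
    have hk : kv.1.length = n := hall kv (by simp)
    have hiff : kv.1 <+: cs ↔ kv.1 = cs.take n := by
      constructor
      · intro hp
        have := List.prefix_iff_eq_take.mp hp
        rwa [hk] at this
      · intro he
        rw [he]
        exact List.take_prefix n cs
    have hb : pfx cs kv = (kv.1 == cs.take n) := by
      by_cases he : kv.1 = cs.take n
      · have hx : kv.1.isPrefixOf cs = true := by
          rw [List.isPrefixOf_iff_prefix]
          exact hiff.mpr he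
        rw [show pfx cs kv = kv.1.isPrefixOf cs from rfl, hx, he]
        exact (beq_self_eq_true _).symm
      · have hnp : ¬ kv.1 <+: cs := fun hp => he (hiff.mp hp)
        have hx : kv.1.isPrefixOf cs = false := by
          simp only [Bool.eq_false_iff, ne_eq, List.isPrefixOf_iff_prefix]
          exact hnp
        rw [show pfx cs kv = kv.1.isPrefixOf cs from rfl, hx]
        exact (beq_eq_false_iff_ne.mpr he).symm
    cases hbe : (kv.1 == cs.take n) <;>
      simp [hb, hbe, ih (fun x hx => hall x (by simp [hx]))]

theorem find?_pfx_none_of_short (l : List (List Char × List Char)) (cs : List Char) (n : Nat)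
    (hall : ∀ kv ∈ l, kv.1.length = n) (hn : cs.length < n) :
    l.find? (pfx cs) = none := by
  induction l with
  | nil => rfl
  | cons kv t ih =>
    have hk : kv.1.length = n := hall kv (by simp)
    have hp : ¬ kv.1 <+: cs := fun hp => by have := hp.length_le; omega
    have : pfx cs kv = false := by
      simp only [pfx, Bool.eq_false_iff, ne_eq, List.isPrefixOf_iff_prefix]
      exact hp
    simp [this, ih (fun x hx => hall x (by simp [hx]))]

-- dictGet on the next chunk of length n is the first-match scan of the length-n segment
theorem dictGet_seg (cs : List Char) (n : Nat) (seg : List (List Char × List Char))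
    (hseg : pvDict.filter (fun kv => kv.1.length == n) = seg) (hn : n ≤ cs.length) :
    dictGet (cs.take n) = (seg.find? (fun kv => kv.1 == cs.take n)).map (fun kv => kv.2) := by
  unfold dictGet
  rw [find?_eq_find?_filter_len pvDict (cs.take n) n (by simp [List.length_take]; omega), hseg]

-- A's cascade, level by level, equals B's scan of the corresponding segments
theorem stepA1_eq (cs : List Char) (h1 : 1 ≤ cs.length) :
    stepA1 cs = stepOf (pvK1.find? (pfx cs)) cs := by
  unfold stepA1
  rw [find?_pfx_eq_find?_take pvK1 cs 1 pvK1_len h1, dictGet_seg cs 1 pvK1 rfl h1]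
  cases hf : pvK1.find? (fun kv => kv.1 == cs.take 1) with
  | some kv => simp [stepOf, pvK1_len kv (List.mem_of_find?_eq_some hf)]
  | none => simp [stepOf]

theorem stepA2_eq (cs : List Char) (h1 : 1 ≤ cs.length) :
    stepA2 cs = stepOf ((pvK2.find? (pfx cs)).or (pvK1.find? (pfx cs))) cs := by
  unfold stepA2
  by_cases h2 : 2 ≤ cs.length
  · rw [if_pos h2, find?_pfx_eq_find?_take pvK2 cs 2 pvK2_len h2, dictGet_seg cs 2 pvK2 rfl h2]
    cases hf : pvK2.find? (fun kv => kv.1 == cs.take 2) with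
    | some kv => simp [stepOf, pvK2_len kv (List.mem_of_find?_eq_some hf)]
    | none => simp [stepA1_eq cs h1]
  · rw [if_neg h2, find?_pfx_none_of_short pvK2 cs 2 pvK2_len (by omega)]
    simp [stepA1_eq cs h1]

theorem stepA_eq (cs : List Char) (h1 : 1 ≤ cs.length) :
    stepA cs = stepOf ((pvK3.find? (pfx cs)).or ((pvK2.find? (pfx cs)).or (pvK1.find? (pfx cs)))) cs := by
  unfold stepA
  by_cases h3 : 3 ≤ cs.length
  · rw [if_pos h3, find?_pfx_eq_find?_take pvK3 cs 3 pvK3_len h3, dictGet_seg cs 3 pvK3 rfl h3]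
    cases hf : pvK3.find? (fun kv => kv.1 == cs.take 3) with
    | some kv => simp [stepOf, pvK3_len kv (List.mem_of_find?_eq_some hf)]
    | none => simp [stepA2_eq cs h1]
  · rw [if_neg h3, find?_pfx_none_of_short pvK3 cs 3 pvK3_len (by omega)]
    simp [stepA2_eq cs h1]

-- the per-position decisions agree whenever "chha" is not a prefix of the remaining suffix
theorem step_agree (cs : List Char) (h1 : 1 ≤ cs.length) (hp : ¬ ("chha".toList <+: cs)) :
    stepA cs = stepS cs := by
  have hp' : ¬ (['c', 'h', 'h', 'a'] : List Char) <+: cs := hp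
  have hK4 : pvK4.find? (pfx cs) = none := by
    have hx : (['c', 'h', 'h', 'a'] : List Char).isPrefixOf cs = false := by
      simp only [Bool.eq_false_iff, ne_eq, List.isPrefixOf_iff_prefix]
      exact hp'
    rw [pvK4_eq]
    simp [List.find?, pfx, hx]
  unfold stepS
  show stepA cs = stepOf (itemsB.find? (pfx cs)) cs
  rw [items_eq, List.find?_append, List.find?_append, List.find?_append, hK4, Option.none_or,
      stepA_eq cs h1, Option.or_assoc]

-- every step advances by at least one character
theorem stepS_pos (cs : List Char) : 1 ≤ (stepS cs).2 := by
  unfold stepS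
  cases hf : itemsB.find? (fun kv => kv.1.isPrefixOf cs) with
  | none => simp
  | some kv =>
    have hm := List.mem_of_find?_eq_some hf
    have hall : ∀ kv ∈ itemsB, 1 ≤ kv.1.length := by decide
    simpa using hall kv hm

-- with no "chha" anywhere in the suffix, the two loops produce the same output
theorem go_agree (fuel : Nat) : ∀ cs : List Char, cs.length ≤ fuel →
    ¬ ("chha".toList <:+: cs) → goA fuel cs = goBf fuel cs := by
  induction fuel with
  | zero =>
    intro cs h _
    cases cs
    · rfl
    · simp at h
  | succ n ih =>
    intro cs hlen hinf
    cases cs with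
    | nil => rfl
    | cons c rest =>
      have h1 : 1 ≤ (c :: rest).length := by simp
      have hstep := step_agree (c :: rest) h1 (fun hp => hinf hp.isInfix)
      rw [goBf_succ]
      show (stepA (c :: rest)).1 ++ goA n ((c :: rest).drop (stepA (c :: rest)).2)
         = (stepS (c :: rest)).1 ++ goBf n ((c :: rest).drop (stepS (c :: rest)).2)
      rw [hstep]
      congr 1
      apply ih
      · have := stepS_pos (c :: rest)
        simp only [List.length_drop]
        simp at hlen ⊢
        omega
      · intro hin
        exact hinf (hin.trans (List.drop_suffix _ _).isInfix)

-- on a suffix that begins with chha: A's cascade finds nothing (no proper prefix of chha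
-- is a dict key), falls back to the raw first letter, while B's scan matches its top item
theorem dictGet_chh : dictGet ['c', 'h', 'h'] = none := by decide
theorem dictGet_ch : dictGet ['c', 'h'] = none := by decide
theorem dictGet_c : dictGet ['c'] = none := by decide

theorem stepA_chha (t : List Char) : stepA ('c' :: 'h' :: 'h' :: 'a' :: t) = (['c'], 1) := by
  have h3 : 3 ≤ ('c' :: 'h' :: 'h' :: 'a' :: t).length := by simp
  have h2 : 2 ≤ ('c' :: 'h' :: 'h' :: 'a' :: t).length := by simp
  unfold stepA stepA2 stepA1
  rw [if_pos h3, if_pos h2]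
  simp only [List.take_succ_cons, List.take_zero, dictGet_chh, dictGet_ch, dictGet_c]

theorem stepS_chha (t : List Char) : stepS ('c' :: 'h' :: 'h' :: 'a' :: t) = (['छ'], 4) := by
  have hx : pfx ('c' :: 'h' :: 'h' :: 'a' :: t) ((['c', 'h', 'h', 'a'] : List Char), (['छ'] : List Char)) = true := by
    rw [show pfx ('c' :: 'h' :: 'h' :: 'a' :: t) ((['c', 'h', 'h', 'a'] : List Char), (['छ'] : List Char))
          = ((['c', 'h', 'h', 'a'] : List Char).isPrefixOf ('c' :: 'h' :: 'h' :: 'a' :: t)) from rfl,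
        List.isPrefixOf_iff_prefix]
    exact ⟨t, rfl⟩
  unfold stepS
  show stepOf (itemsB.find? (pfx ('c' :: 'h' :: 'h' :: 'a' :: t))) ('c' :: 'h' :: 'h' :: 'a' :: t) = (['छ'], 4)
  rw [items_eq, pvK4_eq, List.find?_append]
  simp [hx, stepOf]

-- no key below the top item carries a 'c' after its first letter, so a match at the
-- current position can never run past the 'c' that starts a later "chha" occurrence
theorem tail_keys_no_c : ∀ kv ∈ pvK3 ++ pvK2 ++ pvK1, 'c' ∉ kv.1.drop 1 := by decide

theorem stepS_le_of_inner_c (s t' : List Char) (hs : s ≠ [])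
    (hp : ¬ ("chha".toList <+: s ++ "chha".toList ++ t')) :
    (stepS (s ++ "chha".toList ++ t')).2 ≤ s.length := by
  have hs1 : 1 ≤ s.length := List.length_pos_of_ne_nil hs
  unfold stepS
  cases hf : itemsB.find? (fun kv => kv.1.isPrefixOf (s ++ "chha".toList ++ t')) with
  | none => simpa using hs1
  | some kv =>
    simp only
    by_contra hgt
    have hi : s.length < kv.1.length := by omega
    have hkp : kv.1 <+: s ++ "chha".toList ++ t' := by
      have := List.find?_some hf
      rwa [List.isPrefixOf_iff_prefix] at this
    have hmem : kv ∈ itemsB := List.mem_of_find?_eq_some hf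
    have hkv4 : kv ≠ ("chha".toList, "छ".toList) := by
      intro he
      have h1' : kv.1 = "chha".toList := congrArg Prod.fst he
      rw [h1'] at hkp
      exact hp hkp
    have hmem' : kv ∈ pvK3 ++ pvK2 ++ pvK1 := by
      rw [items_eq, pvK4_eq] at hmem
      rcases List.mem_append.mp hmem with h | h
      · rcases List.mem_append.mp h with h' | h'
        · rcases List.mem_append.mp h' with h'' | h''
          · rw [List.mem_singleton] at h''
            exact absurd h'' hkv4
          · exact List.mem_append.mpr (Or.inl (List.mem_append.mpr (Or.inl h'')))
        · exact List.mem_append.mpr (Or.inl (List.mem_append.mpr (Or.inr h')))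
      · exact List.mem_append.mpr (Or.inr h)
    have hil : s.length < (s ++ "chha".toList ++ t').length := lt_of_lt_of_le hi hkp.length_le
    have e1 : kv.1[s.length]'hi = (s ++ "chha".toList ++ t')[s.length]'hil :=
      List.IsPrefix.getElem hkp hi
    have e2 : (s ++ "chha".toList ++ t')[s.length]'hil = 'c' := by
      have ha : s.length < (s ++ "chha".toList).length := by simp
      rw [List.getElem_append_left ha]
      rw [List.getElem_append_right (le_refl s.length)]
      simp
    have e3 : 'c' ∈ kv.1.drop 1 := by
      have hidx : 1 + (s.length - 1) = s.length := by omega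
      have hgd : (kv.1.drop 1)[s.length - 1]'(by simp; omega) = 'c' := by
        rw [List.getElem_drop]
        simp only [hidx]
        exact e1.trans e2
      exact hgd ▸ List.getElem_mem _
    exact tail_keys_no_c kv hmem' e3

-- wherever "chha" occurs in the suffix, the two loops' outputs differ
theorem go_ne (fuel : Nat) : ∀ cs : List Char, cs.length ≤ fuel →
    ("chha".toList <:+: cs) → goA fuel cs ≠ goBf fuel cs := by
  induction fuel with
  | zero =>
    intro cs h hinf
    obtain ⟨s, t', hst⟩ := hinf
    have : cs.length = 0 := by omega
    rw [← hst] at this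
    simp at this
  | succ n ih =>
    intro cs hlen hinf
    obtain ⟨s, t', hst⟩ := hinf
    by_cases hp : "chha".toList <+: cs
    · obtain ⟨t, ht⟩ := hp
      have hcs : cs = 'c' :: 'h' :: 'h' :: 'a' :: t := ht.symm
      subst hcs
      rw [goBf_succ]
      show (stepA _).1 ++ goA n _ ≠ (stepS _).1 ++ goBf n _
      rw [stepA_chha t, stepS_chha t]
      intro h
      have := List.head_eq_of_cons_eq h
      simp at this
    · have hne : cs ≠ [] := by
        intro h
        rw [h] at hst
        simp at hst
      have h1 : 1 ≤ cs.length := List.length_pos_of_ne_nil hne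
      have hstep := step_agree cs h1 hp
      have hs : s ≠ [] := by
        intro h
        exact hp ⟨t', by rw [← hst, h]; simp⟩
      cases cs with
      | nil => exact absurd rfl hne
      | cons c rest =>
        have hk : (stepS (c :: rest)).2 ≤ s.length := by
          rw [← hst]
          exact stepS_le_of_inner_c s t' hs (hst ▸ hp)
        rw [goBf_succ]
        show (stepA (c :: rest)).1 ++ goA n ((c :: rest).drop (stepA (c :: rest)).2)
           ≠ (stepS (c :: rest)).1 ++ goBf n ((c :: rest).drop (stepS (c :: rest)).2)
        rw [hstep]
        set k := (stepS (c :: rest)).2 with hkeq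
        have hk1 : 1 ≤ k := stepS_pos (c :: rest)
        intro h
        have htail := List.append_cancel_left h
        have hdrop : "chha".toList <:+: (c :: rest).drop k := by
          have hde : (c :: rest).drop k = s.drop k ++ ("chha".toList ++ t') := by
            rw [← hst, List.append_assoc]
            exact List.drop_append_of_le_length hk
          refine ⟨s.drop k, t', ?_⟩
          rw [hde, List.append_assoc]
        refine ih ((c :: rest).drop k) ?_ hdrop htail
        have hlen' : (c :: rest).length ≤ n + 1 := hlen
        simp only [List.length_drop]
        simp only [List.length_cons] at hlen' ⊢
        omega

-- ===== VERDICT (by name: the statement is the Claim_ definition above) =====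
theorem latin_to_devanagari_py_spec : Claim_unchanged_latin_to_devanagari_py := by
  intro word _ hnd
  unfold latin_to_devanagari_py latin_to_devanagari_py_alt
  rw [goB_eq_goS, List.drop_zero, List.nil_append]
  have hlen : (PySem.Chars.lower word.toList).length = word.toList.length := by
    simp [PySem.Chars.lower]
  rw [hlen]
  congr 1
  apply go_agree
  · simp [PySem.Chars.lower]
  · intro hin
    exact hnd ((PySem.Chars.isIn_iff_infix _ _).mpr hin)

theorem latin_to_devanagari_py_changed : Claim_changed_latin_to_devanagari_py := by
  unfold Claim_changed_latin_to_devanagari_py; decide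

theorem latin_to_devanagari_py_tight : Claim_exact_latin_to_devanagari_py := by
  intro word _ hd heq
  have hl := String.ofList_inj.mp heq
  rw [goB_eq_goS, List.drop_zero, List.nil_append] at hl
  have hlen : (PySem.Chars.lower word.toList).length = word.toList.length := by
    simp [PySem.Chars.lower]
  rw [hlen] at hl
  have hinf := (PySem.Chars.isIn_iff_infix _ _).mp hd
  exact go_ne word.toList.length (PySem.Chars.lower word.toList) (by simp [PySem.Chars.lower]) hinf hl
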